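-- pv_equiv track=rewrite | github.com/yoniebans/poker-rl-data | data_wrangler/pokergpt_formatter.py | _analyze_betting_context
-- ===== SOURCE A (Python) =====
-- from typing import Dict, List, Any, Optional, Tuple
--
-- def _analyze_betting_context(stage_actions: List[Dict[str, Any]]) -> Dict[str, bool]:
--     """
--     Analyze the betting context of the current stage.
--
--     Args:
--         stage_actions: List of actions in the current betting stage
--
--     Returns:
--         Dictionary with betting context information:
--         - has_bet: Whether anyone has bet in this round
--         - has_raise: Whether anyone has raised in this round
--         - facing_all_in: Whether player is facing an all-in
--     """
--     context = {
--         'has_bet': False,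
--         'has_raise': False,
--         'facing_all_in': False
--     }
--
--     for action in stage_actions:
--         action_type = action.get('action', '')
--
--         # Check for bets
--         if action_type in ['bets', 'raises']:
--             if not context['has_bet']:
--                 context['has_bet'] = True
--             else:
--                 # If there's already a bet and someone raises, mark as raise
--                 context['has_raise'] = True
--
--         # Check for all-ins - either as text in action_type or as a dedicated flag
--         if 'all-in' in action_type.lower() or action.get('is_all_in', False):
--             context['facing_all_in'] = True
--
--     return context
-- ===== SOURCE B (Python) =====
-- from typing import Dict, List, Any
--
-- def _analyze_betting_context(stage_actions: List[Dict[str, Any]]) -> Dict[str, bool]: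
--     bet_count = sum(1 for a in stage_actions
--                     if a.get('action', '') in ('bets', 'raises'))
--     facing_all_in = any('all-in' in a.get('action', '').lower()
--                         or a.get('is_all_in', False)
--                         for a in stage_actions)
--     return {
--         'has_bet': bet_count >= 1,
--         'has_raise': bet_count >= 2,
--         'facing_all_in': facing_all_in,
--     }
-- ===== Notes on version B (the rewrite author's own statement) =====
-- stated objective: simpler
-- what changed: Replaces the stateful flag-flipping loop (has_bet/has_raise mutated in sequence) by a count-then-threshold formulation: has_bet = bet_count >= 1, has_raise = bet_count >= 2, with facing_all_in an independent any() scan.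
import Mathlib
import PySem

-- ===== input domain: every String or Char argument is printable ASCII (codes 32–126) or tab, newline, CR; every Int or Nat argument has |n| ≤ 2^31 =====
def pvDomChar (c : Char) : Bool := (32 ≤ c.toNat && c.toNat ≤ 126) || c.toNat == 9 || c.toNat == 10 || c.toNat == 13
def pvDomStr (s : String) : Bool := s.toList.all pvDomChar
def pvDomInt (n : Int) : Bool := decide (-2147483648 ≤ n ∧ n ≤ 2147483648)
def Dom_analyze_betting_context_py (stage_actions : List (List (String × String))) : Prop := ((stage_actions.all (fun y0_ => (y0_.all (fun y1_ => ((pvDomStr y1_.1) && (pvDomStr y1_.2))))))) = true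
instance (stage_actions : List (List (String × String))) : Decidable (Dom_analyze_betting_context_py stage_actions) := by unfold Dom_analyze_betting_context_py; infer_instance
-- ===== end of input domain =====

-- ===== PORT A =====
-- One honest line: B replaces A's stateful flag-flipping loop by count-then-threshold plus an
-- independent any-scan (objective: simpler); same return value.

-- shared Python primitive: action.get(key, '') with first-match assoc-list lookup
def pvGetS (action : List (String × String)) (k : String) : String :=
  (PySem.Dict.mk action).getD k ""

-- truthiness of action.get('is_all_in', False): missing key -> False, a string is truthy iff nonempty
def pvAllInFlag (action : List (String × String)) : Bool :=
  match (PySem.Dict.mk action).get? "is_all_in" with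
  | some v => v != ""
  | none => false

def analyze_betting_context_py (stage_actions : List (List (String × String))) : List (String × Bool) :=
  -- context dict kept as the triple (has_bet, has_raise, facing_all_in), mutated per action
  let c := stage_actions.foldl
    (fun (c : Bool × Bool × Bool) action =>
      let action_type := pvGetS action "action"
      let c :=
        if action_type = "bets" ∨ action_type = "raises" then
          if !c.1 then (true, c.2.1, c.2.2) else (c.1, true, c.2.2)
        else c
      if PySem.Str.isIn "all-in" (PySem.Str.lower action_type) || pvAllInFlag action then
        (c.1, c.2.1, true)
      else c)
    (false, false, false)
  [("has_bet", c.1), ("has_raise", c.2.1), ("facing_all_in", c.2.2)]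

-- ===== PORT B =====
def pvIsBetRaise (action : List (String × String)) : Bool :=
  decide (pvGetS action "action" = "bets" ∨ pvGetS action "action" = "raises")

def pvFacesAllIn (action : List (String × String)) : Bool :=
  PySem.Str.isIn "all-in" (PySem.Str.lower (pvGetS action "action")) || pvAllInFlag action

def analyze_betting_context_py_alt (stage_actions : List (List (String × String))) : List (String × Bool) :=
  let bet_count := stage_actions.countP pvIsBetRaise
  let facing_all_in := stage_actions.any pvFacesAllIn
  [("has_bet", decide (1 ≤ bet_count)),
   ("has_raise", decide (2 ≤ bet_count)),
   ("facing_all_in", facing_all_in)]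

-- ===== PRECONDITION & SPEC =====
def Spec_analyze_betting_context_py (stage_actions : List (List (String × String))) (out : List (String × Bool)) : Prop := out = analyze_betting_context_py_alt stage_actions
instance (stage_actions : List (List (String × String))) (out : List (String × Bool)) : Decidable (Spec_analyze_betting_context_py stage_actions out) := by unfold Spec_analyze_betting_context_py; infer_instance

-- ===== CLAIM (what is proved, stated in full; the proofs are below) =====
def Claim_equal_analyze_betting_context_py : Prop := ∀ (stage_actions : List (List (String × String))), Dom_analyze_betting_context_py stage_actions → Spec_analyze_betting_context_py stage_actions (analyze_betting_context_py stage_actions)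

-- ===== LEMMAS AND PROOFS =====

-- Invariant of A's fold: the flags are thresholds of the running bet/raise count,
-- and the all-in flag is an 'or' over the suffix.
theorem pvFoldInv (sa : List (List (String × String))) (hb hr f : Bool) :
    sa.foldl
      (fun (c : Bool × Bool × Bool) action =>
        let action_type := pvGetS action "action"
        let c :=
          if action_type = "bets" ∨ action_type = "raises" then
            if !c.1 then (true, c.2.1, c.2.2) else (c.1, true, c.2.2)
          else c
        if PySem.Str.isIn "all-in" (PySem.Str.lower action_type) || pvAllInFlag action then
          (c.1, c.2.1, true)
        else c)
      (hb, hr, f)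
    = (hb || decide (1 ≤ sa.countP pvIsBetRaise),
       hr || (hb && decide (1 ≤ sa.countP pvIsBetRaise)) || decide (2 ≤ sa.countP pvIsBetRaise),
       f || sa.any pvFacesAllIn) := by
  induction sa generalizing hb hr f with
  | nil => simp
  | cons a sa ih =>
    simp only [List.foldl_cons, List.countP_cons, List.any_cons]
    by_cases hbet : pvGetS a "action" = "bets" ∨ pvGetS a "action" = "raises" <;>
      by_cases hall : (PySem.Str.isIn "all-in" (PySem.Str.lower (pvGetS a "action")) || pvAllInFlag a) = true <;>
        cases hb <;>
          simp only [pvIsBetRaise, pvFacesAllIn, hbet, hall, if_pos, if_neg, decide_true,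
            decide_false, Bool.not_true, Bool.not_false, ih,
            Bool.true_or, Bool.false_or, Bool.true_and, Bool.false_and, Bool.or_false,
            Bool.or_assoc, Bool.or_true, Bool.false_eq_true, reduceIte, not_false_eq_true] <;>
          first
          | rfl
          | (refine Prod.ext ?_ (Prod.ext ?_ ?_) <;>
              simp only [decide_eq_decide] <;>
              first
              | rfl
              | (simp only [Bool.or_eq_true, decide_eq_true_eq] <;> constructor <;> omega)
              | (congr 1 <;> simp only [← Bool.decide_or, decide_eq_decide] <;> omega)
              | (simp only [Nat.le_add_left, decide_true, Bool.true_or, Bool.or_true]))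

-- ===== VERDICT (by name: the statement is the Claim_ definition above) =====
theorem analyze_betting_context_py_spec : Claim_equal_analyze_betting_context_py := by
  intro sa _
  unfold Spec_analyze_betting_context_py analyze_betting_context_py analyze_betting_context_py_alt
  simp only [pvFoldInv, Bool.false_or, Bool.false_and]
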